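-- pv_equiv track=rewrite | github.com/Linktech-Engineering-LLC/BotScanner-Community | BotScanner/firewall/backend/helpers/ufw_utils.py | parse_ufw_show_raw
-- ===== SOURCE A (Python) =====
-- def parse_ufw_show_raw(text: str) -> dict:
--     """
--     Parse `ufw show raw` output.
--
--     For now, this is a thin wrapper that just returns the raw text
--     grouped by table markers. You can expand this later if you want
--     deeper iptables-level introspection.
--     """
--     tables = {}
--     current = None
--     lines = []
--
--     for line in text.splitlines():
--         stripped = line.strip()
--
--         # Table header: e.g. "*filter", "*nat"
--         if stripped.startswith("*"):
--             # flush previous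
--             if current and lines:
--                 tables[current] = "\n".join(lines)
--             current = stripped[1:]
--             lines = []
--             continue
--
--         # Commit marker
--         if stripped.lower() == "commit":
--             if current and lines:
--                 tables[current] = "\n".join(lines)
--             current = None
--             lines = []
--             continue
--
--         if current:
--             lines.append(line)
--
--     # Final flush
--     if current and lines:
--         tables[current] = "\n".join(lines)
--
--     return tables
-- ===== SOURCE B (Python) =====
-- def parse_ufw_show_raw(text: str) -> dict:
--     """Parse `ufw show raw` output: header-driven nested scan instead of a
--     state-machine pass (name, then inner loop collecting until commit/next header)."""
--     lines = text.splitlines()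
--     tables = {}
--     i, n = 0, len(lines)
--     while i < n:
--         s = lines[i].strip()
--         if not s.startswith("*"):
--             i += 1
--             continue
--         name = s[1:]
--         i += 1
--         content = []
--         while i < n:
--             t = lines[i].strip()
--             if t.startswith("*"):
--                 break
--             if t.lower() == "commit":
--                 i += 1
--                 break
--             content.append(lines[i])
--             i += 1
--         if name and content:
--             tables[name] = "\n".join(content)
--     return tables
-- ===== Notes on version B (the rewrite author's own statement) =====
-- stated objective: alternative
-- what changed: Replaces A's single-pass state machine (current-table variable, pending-lines buffer, flush at headers/commit/EOF) with a header-driven nested scan: an outer loop seeks table-header lines and an inner loop collects each section's lines until a commit marker or the next header, assigning the section once when complete.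
import Mathlib
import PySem

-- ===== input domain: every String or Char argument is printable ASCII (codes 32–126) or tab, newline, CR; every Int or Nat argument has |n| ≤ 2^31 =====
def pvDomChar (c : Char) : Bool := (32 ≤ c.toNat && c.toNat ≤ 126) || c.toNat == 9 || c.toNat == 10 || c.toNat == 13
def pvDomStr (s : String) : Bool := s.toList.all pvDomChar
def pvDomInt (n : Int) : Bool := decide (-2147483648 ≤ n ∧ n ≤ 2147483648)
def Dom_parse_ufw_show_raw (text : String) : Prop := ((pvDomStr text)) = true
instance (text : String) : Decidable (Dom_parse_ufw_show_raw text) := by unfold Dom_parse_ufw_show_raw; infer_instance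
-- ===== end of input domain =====

-- B replaces A's single-pass state machine (current table + pending lines + flushes)
-- by a header-driven nested scan: the outer loop finds table-header lines, an inner loop
-- collects each section's lines until commit/next header. Objective: alternative decomposition.

-- ===== PORT A =====
def pvFlush (tables : PySem.Dict String String) (current : Option String)
    (lns : List String) : PySem.Dict String String :=
  match current with
  | none => tables
  | some c => if c ≠ "" ∧ lns ≠ [] then tables.insert c (PySem.Str.join "\n" lns) else tables

def pvStep (st : PySem.Dict String String × Option String × List String) (line : String) :
    PySem.Dict String String × Option String × List String :=
  let stripped := PySem.Str.strip line
  if PySem.Str.startswith stripped "*" then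
    (pvFlush st.1 st.2.1 st.2.2, some (PySem.Str.slice stripped (some 1) none), [])
  else if PySem.Str.lower stripped = "commit" then
    (pvFlush st.1 st.2.1 st.2.2, none, [])
  else
    match st.2.1 with
    | some c => if c ≠ "" then (st.1, some c, st.2.2 ++ [line]) else st
    | none => st

def parse_ufw_show_raw (text : String) : List (String × String) :=
  let fin := (PySem.Str.splitlines text).foldl pvStep (PySem.Dict.empty, none, [])
  (pvFlush fin.1 fin.2.1 fin.2.2).items

-- ===== PORT B =====
def pvCollect : List String → List String × List String
  | [] => ([], [])
  | l :: rest =>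
    let t := PySem.Str.strip l
    if PySem.Str.startswith t "*" then ([], l :: rest)
    else if PySem.Str.lower t = "commit" then ([], rest)
    else
      let p := pvCollect rest
      (l :: p.1, p.2)

theorem pvCollect_len (L : List String) : (pvCollect L).2.length ≤ L.length := by
  induction L with
  | nil => simp [pvCollect]
  | cons l rest ih =>
    simp only [pvCollect]
    split_ifs <;> simp
    omega

def pvGo : List String → PySem.Dict String String → PySem.Dict String String
  | [], tables => tables
  | l :: rest, tables =>
    let s := PySem.Str.strip l
    if PySem.Str.startswith s "*" then
      let name := PySem.Str.slice s (some 1) none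
      let p := pvCollect rest
      pvGo p.2
        (if name ≠ "" ∧ p.1 ≠ [] then tables.insert name (PySem.Str.join "\n" p.1) else tables)
    else pvGo rest tables
termination_by ls _ => ls.length
decreasing_by
  · exact Nat.lt_succ_of_le (pvCollect_len rest)
  · exact Nat.lt_succ_of_le (Nat.le_refl _)

def parse_ufw_show_raw_alt (text : String) : List (String × String) :=
  (pvGo (PySem.Str.splitlines text) PySem.Dict.empty).items

-- ===== PRECONDITION & SPEC =====
def Spec_parse_ufw_show_raw (text : String) (out : List (String × String)) : Prop := out = parse_ufw_show_raw_alt text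
instance (text : String) (out : List (String × String)) : Decidable (Spec_parse_ufw_show_raw text out) := by unfold Spec_parse_ufw_show_raw; infer_instance

-- ===== CLAIM (what is proved, stated in full; the proofs are below) =====
def Claim_equal_parse_ufw_show_raw : Prop := ∀ (text : String), Dom_parse_ufw_show_raw text → Spec_parse_ufw_show_raw text (parse_ufw_show_raw text)

-- ===== LEMMAS AND PROOFS =====

/-- The state-machine invariant: running A's fold from any state equals B's
nested scan, where a pending table `some c` with accumulated `acc` corresponds
to collecting the rest of the current section first. -/
theorem pvMain (L : List String) :
    ∀ (tables : PySem.Dict String String) (cur : Option String) (acc : List String),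
    pvFlush (L.foldl pvStep (tables, cur, acc)).1 (L.foldl pvStep (tables, cur, acc)).2.1
        (L.foldl pvStep (tables, cur, acc)).2.2 =
      match cur with
      | none => pvGo L tables
      | some c =>
          pvGo (pvCollect L).2
            (if c ≠ "" ∧ acc ++ (pvCollect L).1 ≠ [] then
              tables.insert c (PySem.Str.join "\n" (acc ++ (pvCollect L).1)) else tables) := by
  induction L with
  | nil =>
    intro tables cur acc
    cases cur with
    | none => simp [pvFlush, pvGo]
    | some c => simp [pvFlush, pvCollect, pvGo]
  | cons l rest ih =>
    intro tables cur acc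
    cases cur with
    | none =>
      by_cases h1 : PySem.Str.startswith (PySem.Str.strip l) "*" = true
      · simp only [List.foldl_cons, pvStep, pvGo, h1, if_true]
        rw [ih]
        simp [pvFlush]
      · by_cases h2 : PySem.Str.lower (PySem.Str.strip l) = "commit"
        · simp only [List.foldl_cons, pvStep, pvGo, h1, h2, if_true, if_false, Bool.false_eq_true]
          rw [ih]
          simp [pvFlush]
        · simp only [List.foldl_cons, pvStep, pvGo, h1, h2, if_false, Bool.false_eq_true]
          rw [ih]
    | some c =>
      by_cases h1 : PySem.Str.startswith (PySem.Str.strip l) "*" = true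
      · simp only [List.foldl_cons, pvStep, pvGo, pvCollect, h1, if_true]
        rw [ih]
        simp [pvFlush]
      · by_cases h2 : PySem.Str.lower (PySem.Str.strip l) = "commit"
        · simp only [List.foldl_cons, pvStep, pvCollect, h1, h2, if_true, if_false,
            Bool.false_eq_true]
          rw [ih]
          simp [pvFlush]
        · by_cases hc : c = ""
          · simp only [List.foldl_cons, pvStep, pvCollect, h1, h2, if_false, Bool.false_eq_true,
              hc]
            rw [ih]
            simp
          · simp only [List.foldl_cons, pvStep, pvCollect, h1, h2, if_false, Bool.false_eq_true]
            rw [ih]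
            simp [hc, List.append_assoc]

-- ===== VERDICT (by name: the statement is the Claim_ definition above) =====
theorem parse_ufw_show_raw_spec : Claim_equal_parse_ufw_show_raw := by
  intro text _
  unfold Spec_parse_ufw_show_raw parse_ufw_show_raw parse_ufw_show_raw_alt
  exact congrArg PySem.Dict.items (pvMain (PySem.Str.splitlines text) PySem.Dict.empty none [])
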